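-- pv_equiv track=rewrite | github.com/DDuaneSchmidt/constellation_2_runtime | constellation_2/phaseI/cross_asset_trend/run/run_cross_asset_trend_intents_day_v1.py | _parse_symbols_csv
-- ===== SOURCE A (Python) =====
-- from typing import Any, Dict, Iterable, List, Optional, Tuple
--
-- class CrossAssetTrendError(Exception):
--     pass
--
-- def _parse_symbols_csv(s: str) -> List[str]:
--     raw = (s or "").strip()
--     if raw == "":
--         raise CrossAssetTrendError("SYMBOLS_EMPTY")
--     out: List[str] = []
--     for part in raw.split(","):
--         sym = part.strip().upper()
--         if sym:
--             out.append(sym)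
--     if not out:
--         raise CrossAssetTrendError("SYMBOLS_EMPTY_AFTER_PARSE")
--     # de-dup preserving order
--     dedup: List[str] = []
--     seen = set()
--     for sym in out:
--         if sym not in seen:
--             seen.add(sym)
--             dedup.append(sym)
--     return dedup
-- ===== SOURCE B (Python) =====
-- from typing import List
--
--
-- class CrossAssetTrendError(Exception):
--     pass
--
--
-- def _parse_symbols_csv(s: str) -> List[str]:
--     raw = (s or "").strip()
--     if raw == "":
--         raise CrossAssetTrendError("SYMBOLS_EMPTY")
--     # One character-level state machine over raw + ",": no split(), no per-part
--     # strip()/upper() calls.  `token` is the current symbol built so far (already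
--     # right-stripped and uppercased); `pend` buffers a run of whitespace that is
--     # only committed to `token` if a further non-space character follows.
--     # Each ',' finalizes the token and de-duplicates it on the fly.
--     result: List[str] = []
--     seen = set()
--     token = ""
--     pend = ""
--     for ch in raw + ",":
--         if ch == ",":
--             if token and token not in seen:
--                 seen.add(token)
--                 result.append(token)
--             token = pend = ""
--         elif ch.isspace():
--             if token:
--                 pend += ch
--         else:
--             token += pend + ch.upper()
--             pend = ""
--     if not result:
--         raise CrossAssetTrendError("SYMBOLS_EMPTY_AFTER_PARSE")
--     return result
-- ===== Notes on version B (the rewrite author's own statement) =====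
-- stated objective: alternative
-- what changed: A's staged passes (split on ',', per-part strip().upper() with a collect loop, then a separate seen-set dedup loop) are replaced by a single character-level state machine over the stripped input that tokenizes, strips, uppercases and de-duplicates in one scan, with no split() and no per-part string methods.
-- outside the precondition, e.g. on _parse_symbols_csv(','): A raises CrossAssetTrendError, B raises CrossAssetTrendError
import Mathlib
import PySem

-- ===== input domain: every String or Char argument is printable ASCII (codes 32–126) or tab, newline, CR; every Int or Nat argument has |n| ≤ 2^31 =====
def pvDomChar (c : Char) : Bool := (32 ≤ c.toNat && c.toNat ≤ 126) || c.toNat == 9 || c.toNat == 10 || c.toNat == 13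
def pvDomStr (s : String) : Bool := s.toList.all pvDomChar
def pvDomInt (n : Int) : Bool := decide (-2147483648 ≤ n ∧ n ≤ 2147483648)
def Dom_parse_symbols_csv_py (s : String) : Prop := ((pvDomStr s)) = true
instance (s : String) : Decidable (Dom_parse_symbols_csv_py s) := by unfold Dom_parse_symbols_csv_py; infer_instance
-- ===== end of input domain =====

-- B replaces A's split/strip/upper passes and separate dedup loop by one character-level
-- state machine over the stripped input (objective: alternative — a different algorithm,
-- same O(n) cost).

-- ===== PORT A =====
-- the body of A's first loop: sym = part.strip().upper(); if sym: out.append(sym)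
def pvA_collect (acc : List String) (part : String) : List String :=
  let sym := PySem.Str.upper (PySem.Str.strip part)
  if sym ≠ "" then acc ++ [sym] else acc

-- the body of A's dedup loop: if sym not in seen: seen.add(sym); dedup.append(sym)
def pvA_dedupStep (p : List String × PySem.Set String) (sym : String) : List String × PySem.Set String :=
  if PySem.Set.contains p.2 sym = false then (p.1 ++ [sym], PySem.Set.add p.2 sym) else p

-- raw.split(",") = PySem.Str.split? raw "," (some, since the separator "," is non-empty)
def parse_symbols_csv_py (s : String) : List String :=
  let raw := PySem.Str.strip s
  let out : List String := ((PySem.Str.split? raw ",").getD []).foldl pvA_collect []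
  (out.foldl pvA_dedupStep ([], PySem.Set.empty)).1

-- ===== PORT B =====
-- one step of B's state machine; state = ((result, seen), token, pend), token/pend as List Char
def pvB_step (st : (List String × PySem.Set String) × List Char × List Char) (ch : Char) :
    (List String × PySem.Set String) × List Char × List Char :=
  if ch = ',' then
    (if st.2.1 ≠ [] ∧ PySem.Set.contains st.1.2 (String.ofList st.2.1) = false then
        (st.1.1 ++ [String.ofList st.2.1], PySem.Set.add st.1.2 (String.ofList st.2.1))
      else st.1, [], [])
  else if PySem.Chars.isspace ch then
    (st.1, st.2.1, if st.2.1 ≠ [] then st.2.2 ++ [ch] else st.2.2)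
  else
    (st.1, st.2.1 ++ st.2.2 ++ [PySem.Chars.upperChar ch], [])

-- for ch in raw + ",": …  (result is the first component of the final state)
def parse_symbols_csv_py_alt (s : String) : List String :=
  let raw := PySem.Str.strip s
  ((raw.toList ++ [',']).foldl pvB_step (([], PySem.Set.empty), [], [])).1.1

-- ===== PRECONDITION & SPEC =====
-- Pre_ excludes exactly the inputs on which Python A raises CrossAssetTrendError
-- (every character whitespace or a comma, so nothing survives the parse); B raises there too.
def Pre_parse_symbols_csv_py (s : String) : Prop :=
  (s.toList.any (fun c => !(PySem.Chars.isspace c) && c ≠ ',')) = true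
instance (s : String) : Decidable (Pre_parse_symbols_csv_py s) := by
  unfold Pre_parse_symbols_csv_py; infer_instance
def pvWitness_parse_symbols_csv_py : String := "aapl, msft ,aapl"
def Spec_parse_symbols_csv_py (s : String) (out : List String) : Prop := out = parse_symbols_csv_py_alt s
instance (s : String) (out : List String) : Decidable (Spec_parse_symbols_csv_py s out) := by unfold Spec_parse_symbols_csv_py; infer_instance

-- ===== CLAIM (what is proved, stated in full; the proofs are below) =====
def Claim_equal_parse_symbols_csv_py : Prop := ∀ (s : String), Dom_parse_symbols_csv_py s → Pre_parse_symbols_csv_py s → Spec_parse_symbols_csv_py s (parse_symbols_csv_py s)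

-- ===== LEMMAS AND PROOFS =====

-- (first field, remaining fields) of splitting a char list on ','
def pvSplitCF : List Char → List Char × List (List Char)
  | [] => ([], [])
  | c :: r => if c = ',' then ([], (pvSplitCF r).1 :: (pvSplitCF r).2)
              else ((c :: (pvSplitCF r).1), (pvSplitCF r).2)

-- the symbol a field contributes: strip then upper
def pvSym (f : List Char) : List Char := PySem.Chars.upper (PySem.Chars.strip f)

-- what B's comma step does to (result, seen) given the finished token
def pvEmit (rs : List String × PySem.Set String) (tok : List Char) : List String × PySem.Set String :=
  if tok ≠ [] ∧ PySem.Set.contains rs.2 (String.ofList tok) = false then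
    (rs.1 ++ [String.ofList tok], PySem.Set.add rs.2 (String.ofList tok))
  else rs

-- the token B's machine has at the next comma, given mid-field state (t, p) and the rest f of the field
def pvTokenOf (t p f : List Char) : List Char :=
  if t = [] then pvSym f else t ++ PySem.Chars.upper (PySem.Chars.rstrip (p ++ f))

-- collapsed (result, seen) step used to compare the two sides
def pvH (a : PySem.Set String) (g : List Char) : PySem.Set String :=
  if pvSym g = [] then a else PySem.Set.add a (String.ofList (pvSym g))

-- ---- character classification facts ----

theorem pv_islower_eq_false {c : Char} (h : PySem.Chars.isspace c = true) :
    PySem.Chars.islower c = false := by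
  cases hl : PySem.Chars.islower c
  · rfl
  · exfalso
    simp only [PySem.Chars.islower, Bool.and_eq_true, decide_eq_true_eq, Char.le_def,
      UInt32.le_iff_toNat_le] at hl
    simp only [PySem.Chars.isspace, decide_eq_true_eq, Bool.or_eq_true, Bool.and_eq_true] at h
    have h1 : ('a' : Char).val.toNat = 97 := by decide
    have h2 : ('z' : Char).val.toNat = 122 := by decide
    have h3 : c.toNat = c.val.toNat := rfl
    rw [h1, h2] at hl
    rw [h3] at h
    omega

theorem pv_upperChar_space {c : Char} (h : PySem.Chars.isspace c = true) :
    PySem.Chars.upperChar c = c := by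
  simp [PySem.Chars.upperChar, pv_islower_eq_false h]

theorem pv_rstrip_space {p : List Char} (h : ∀ c ∈ p, PySem.Chars.isspace c = true) :
    PySem.Chars.rstrip p = [] := by
  simp only [PySem.Chars.rstrip, List.reverse_eq_nil_iff, List.dropWhile_eq_nil_iff]
  intro c hc; exact h c (List.mem_reverse.mp hc)

theorem pv_rstrip_append_cons {c : Char} (h : PySem.Chars.isspace c = false)
    (xs ys : List Char) :
    PySem.Chars.rstrip (xs ++ c :: ys) = xs ++ c :: PySem.Chars.rstrip ys := by
  have e : (xs ++ c :: ys).reverse = ys.reverse ++ (c :: xs.reverse) := by simp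
  rw [PySem.Chars.rstrip, e, List.dropWhile_append]
  by_cases hnil : List.dropWhile PySem.Chars.isspace ys.reverse = []
  · simp [hnil, h, PySem.Chars.rstrip]
  · simp [hnil, PySem.Chars.rstrip]

theorem pv_strip_cons_space {c : Char} (h : PySem.Chars.isspace c = true) (l : List Char) :
    PySem.Chars.strip (c :: l) = PySem.Chars.strip l := by
  simp [PySem.Chars.strip, PySem.Chars.lstrip, h]

theorem pv_strip_cons_nonspace {c : Char} (h : PySem.Chars.isspace c = false) (l : List Char) :
    PySem.Chars.strip (c :: l) = c :: PySem.Chars.rstrip l := by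
  simp [PySem.Chars.strip, PySem.Chars.lstrip, h]
  exact pv_rstrip_append_cons h [] l

-- ---- A side: splitOn on "," computes pvSplitCF ----

theorem pv_go_spec : ∀ (fuel : Nat) (l cur : List Char) (acc : List (List Char)),
    l.length ≤ fuel →
    PySem.Chars.splitOn.go [','] fuel l cur acc
      = acc.reverse ++ (cur.reverse ++ (pvSplitCF l).1) :: (pvSplitCF l).2 := by
  intro fuel
  induction fuel with
  | zero =>
    intro l cur acc hl
    have hl0 : l = [] := List.eq_nil_of_length_eq_zero (Nat.le_zero.mp hl)
    subst hl0
    simp [PySem.Chars.splitOn.go, pvSplitCF]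
  | succ n ih =>
    intro l cur acc hl
    cases l with
    | nil => simp [PySem.Chars.splitOn.go, pvSplitCF]
    | cons c rest =>
      by_cases hc : c = ','
      · subst hc
        rw [show PySem.Chars.splitOn.go [','] (n+1) (','::rest) cur acc
              = PySem.Chars.splitOn.go [','] n rest [] (cur.reverse :: acc) from by
            simp [PySem.Chars.splitOn.go, List.isPrefixOf]]
        rw [ih rest [] (cur.reverse :: acc) (by simpa using Nat.le_of_succ_le_succ hl)]
        simp [pvSplitCF]
      · rw [show PySem.Chars.splitOn.go [','] (n+1) (c::rest) cur acc
              = PySem.Chars.splitOn.go [','] n rest (c::cur) acc from by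
            simp [PySem.Chars.splitOn.go, List.isPrefixOf, Ne.symm hc]]
        rw [ih rest (c::cur) acc (by simpa using Nat.le_of_succ_le_succ hl)]
        simp [pvSplitCF, hc]

theorem pv_splitOn_eq (l : List Char) :
    PySem.Chars.splitOn l [','] = (pvSplitCF l).1 :: (pvSplitCF l).2 := by
  have := pv_go_spec (l.length + 1) l [] [] (by omega)
  simpa [PySem.Chars.splitOn] using this

-- A's first loop collects exactly the non-empty stripped-uppercased parts, in order.
theorem pv_collect_eq :
    ∀ (l acc : List String),
    l.foldl pvA_collect acc
      = acc ++ (l.map (fun part => PySem.Str.upper (PySem.Str.strip part))).filter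
          (fun sym => sym ≠ "")
  | [], acc => by simp
  | x :: xs, acc => by
      rw [List.foldl_cons]
      by_cases h : PySem.Str.upper (PySem.Str.strip x) = ""
      · rw [show pvA_collect acc x = acc from by simp [pvA_collect, h],
          pv_collect_eq xs acc]
        simp [h]
      · rw [show pvA_collect acc x = acc ++ [PySem.Str.upper (PySem.Str.strip x)] from by
            simp [pvA_collect, h],
          pv_collect_eq xs (acc ++ [PySem.Str.upper (PySem.Str.strip x)])]
        simp [h]

-- A's dedup loop, started with list = seen-set, keeps both components equal: each step is Set.add.
theorem pv_dedup_eq :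
    ∀ (l : List String) (a : PySem.Set String),
    l.foldl pvA_dedupStep (a, a) = (PySem.Set.update a l, PySem.Set.update a l)
  | [], a => by simp [PySem.Set.update]
  | x :: xs, a => by
      have hstep : pvA_dedupStep (a, a) x = (PySem.Set.add a x, PySem.Set.add a x) := by
        by_cases hmem : x ∈ a
        · simp [pvA_dedupStep, PySem.Set.add, hmem]
        · simp [pvA_dedupStep, PySem.Set.add, hmem]
      rw [List.foldl_cons, hstep, PySem.Set.update_cons]
      exact pv_dedup_eq xs (PySem.Set.add a x)

-- A's whole pipeline as a fold of pvH over the fields of pvSplitCF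
theorem pv_A_eq (s : String) :
    parse_symbols_csv_py s
      = ((pvSplitCF (PySem.Str.strip s).toList).1 :: (pvSplitCF (PySem.Str.strip s).toList).2).foldl pvH [] := by
  simp only [parse_symbols_csv_py]
  rw [show PySem.Str.split? (PySem.Str.strip s) ","
        = some ((((pvSplitCF (PySem.Str.strip s).toList).1
            :: (pvSplitCF (PySem.Str.strip s).toList).2).map String.ofList)) from by
      simp [PySem.Str.split?, PySem.Chars.split?, pv_splitOn_eq]]
  simp only [Option.getD_some]
  rw [pv_collect_eq]
  have hded : ∀ (out : List String),
      (out.foldl pvA_dedupStep ([], PySem.Set.empty)).1 = out.foldl PySem.Set.add [] := by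
    intro out
    calc (out.foldl pvA_dedupStep ([], PySem.Set.empty)).1
        = (out.foldl pvA_dedupStep (([] : List String), ([] : PySem.Set String))).1 := rfl
      _ = PySem.Set.update [] out := by rw [pv_dedup_eq out []]
      _ = out.foldl PySem.Set.add [] := by simp [PySem.Set.update]
  rw [hded, List.nil_append, List.map_map, List.foldl_filter, List.foldl_map]
  apply PySem.List.foldl_congr_mem
  intro a f _
  have hsym : PySem.Str.upper (PySem.Str.strip (String.ofList f)) = String.ofList (pvSym f) := by
    simp [PySem.Str.upper, PySem.Str.strip, pvSym]
  by_cases hf : pvSym f = []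
  · simp [pvH, hsym, hf]
  · have : String.ofList (pvSym f) ≠ "" := by
      intro h; exact hf (by simpa using String.ofList_inj.mp (by simpa using h))
    simp [pvH, hsym, hf, this]

-- ---- B side: the machine over (l ++ [',']) folds pvEmit over the fields ----

theorem pv_B_comma (rs : List String × PySem.Set String) (t p : List Char) :
    pvB_step (rs, t, p) ',' = (pvEmit rs t, [], []) := by
  simp [pvB_step, pvEmit]

theorem pv_tokenOf_nil_nil (g : List Char) : pvTokenOf [] [] g = pvSym g := by
  simp [pvTokenOf]

theorem pv_emit_tokenOf_nil (rs : List String × PySem.Set String) (t p : List Char)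
    (hinv : t = [] → p = []) (hp : ∀ c ∈ p, PySem.Chars.isspace c = true) :
    pvEmit rs (pvTokenOf t p []) = pvEmit rs t := by
  by_cases ht : t = []
  · subst ht; rw [hinv rfl]
    simp [pvTokenOf, pvSym, PySem.Chars.strip, PySem.Chars.lstrip, PySem.Chars.rstrip,
      PySem.Chars.upper]
  · simp [pvTokenOf, ht, pv_rstrip_space hp, PySem.Chars.upper]

theorem pv_B_run : ∀ (l t p : List Char) (rs : List String × PySem.Set String),
    (t = [] → p = []) → (∀ c ∈ p, PySem.Chars.isspace c = true) →
    (l ++ [',']).foldl pvB_step (rs, t, p)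
      = ((pvSplitCF l).2.foldl (fun a g => pvEmit a (pvSym g))
           (pvEmit rs (pvTokenOf t p (pvSplitCF l).1)), [], []) := by
  intro l
  induction l with
  | nil =>
    intro t p rs hinv hp
    simp only [List.nil_append, List.foldl_cons, List.foldl_nil, pv_B_comma, pvSplitCF]
    rw [pv_emit_tokenOf_nil rs t p hinv hp]
  | cons c l' ih =>
    intro t p rs hinv hp
    by_cases hc : c = ','
    · subst hc
      rw [List.cons_append, List.foldl_cons, pv_B_comma,
        ih [] [] (pvEmit rs t) (fun _ => rfl) (by simp)]
      have hsplit : pvSplitCF (',' :: l') = ([], (pvSplitCF l').1 :: (pvSplitCF l').2) := by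
        simp [pvSplitCF]
      rw [hsplit]
      simp only [List.foldl_cons]
      rw [pv_emit_tokenOf_nil rs t p hinv hp, pv_tokenOf_nil_nil]
    · have hsplit : pvSplitCF (c :: l') = (c :: (pvSplitCF l').1, (pvSplitCF l').2) := by
        simp [pvSplitCF, hc]
      by_cases hs : PySem.Chars.isspace c = true
      · by_cases ht : t = []
        · have hp0 : p = [] := hinv ht
          subst ht; subst hp0
          have hstep : pvB_step (rs, ([] : List Char), ([] : List Char)) c = (rs, [], []) := by
            simp [pvB_step, hc, hs]
          rw [List.cons_append, List.foldl_cons, hstep, ih [] [] rs (fun _ => rfl) (by simp),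
            hsplit]
          rw [pv_tokenOf_nil_nil, pv_tokenOf_nil_nil,
            show pvSym (c :: (pvSplitCF l').1) = pvSym (pvSplitCF l').1 from by
              simp [pvSym, pv_strip_cons_space hs]]
        · have hstep : pvB_step (rs, t, p) c = (rs, t, p ++ [c]) := by
            simp [pvB_step, hc, hs, ht]
          have hp' : ∀ d ∈ p ++ [c], PySem.Chars.isspace d = true := by
            intro d hd
            rcases List.mem_append.mp hd with h1 | h1
            · exact hp d h1
            · simp at h1; subst h1; exact hs
          rw [List.cons_append, List.foldl_cons, hstep,
            ih t (p ++ [c]) rs (fun h => absurd h ht) hp', hsplit]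
          rw [show pvTokenOf t (p ++ [c]) (pvSplitCF l').1
                = pvTokenOf t p (c :: (pvSplitCF l').1) from by
            simp [pvTokenOf, ht]]
      · have hs' : PySem.Chars.isspace c = false := by simpa using hs
        have hstep : pvB_step (rs, t, p) c
            = (rs, t ++ p ++ [PySem.Chars.upperChar c], []) := by
          simp [pvB_step, hc, hs']
        have hne : t ++ p ++ [PySem.Chars.upperChar c] ≠ [] := by simp
        rw [List.cons_append, List.foldl_cons, hstep,
          ih (t ++ p ++ [PySem.Chars.upperChar c]) [] rs (fun h => absurd h hne) (by simp),
          hsplit]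
        have htok : pvTokenOf (t ++ p ++ [PySem.Chars.upperChar c]) [] (pvSplitCF l').1
            = pvTokenOf t p (c :: (pvSplitCF l').1) := by
          by_cases ht : t = []
          · have hp0 : p = [] := hinv ht
            subst ht; subst hp0
            simp [pvTokenOf, pvSym, pv_strip_cons_nonspace hs', PySem.Chars.upper]
          · simp only [pvTokenOf, ht, hne, List.nil_append]
            rw [pv_rstrip_append_cons hs' p (pvSplitCF l').1]
            simp [PySem.Chars.upper, List.map_congr_left
              (fun d hd => pv_upperChar_space (hp d hd))]
        rw [htok]

-- pvEmit on a (list = seen-set) pair is pvH on both components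
theorem pv_emit_pair (a : PySem.Set String) (tok : List Char) :
    pvEmit (a, a) tok = (if tok = [] then a else PySem.Set.add a (String.ofList tok),
                         if tok = [] then a else PySem.Set.add a (String.ofList tok)) := by
  by_cases htok : tok = []
  · simp [pvEmit, htok]
  · by_cases hmem : String.ofList tok ∈ a
    · simp [pvEmit, htok, hmem]
    · simp [pvEmit, htok, hmem]

theorem pv_emit_foldl : ∀ (fs : List (List Char)) (a : PySem.Set String),
    fs.foldl (fun x g => pvEmit x (pvSym g)) (a, a) = (fs.foldl pvH a, fs.foldl pvH a)
  | [], a => rfl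
  | g :: gs, a => by
      rw [List.foldl_cons, pv_emit_pair, List.foldl_cons]
      have : pvH a g = if pvSym g = [] then a else PySem.Set.add a (String.ofList (pvSym g)) := rfl
      rw [show (if pvSym g = [] then a else PySem.Set.add a (String.ofList (pvSym g))) = pvH a g from rfl]
      exact pv_emit_foldl gs (pvH a g)

-- B's whole pipeline as the same fold of pvH over the same fields
theorem pv_B_eq (s : String) :
    parse_symbols_csv_py_alt s
      = ((pvSplitCF (PySem.Str.strip s).toList).1 :: (pvSplitCF (PySem.Str.strip s).toList).2).foldl pvH [] := by
  simp only [parse_symbols_csv_py_alt]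
  rw [pv_B_run (PySem.Str.strip s).toList [] [] ([], PySem.Set.empty) (fun _ => rfl) (by simp),
    pv_tokenOf_nil_nil]
  generalize (pvSplitCF (PySem.Str.strip s).toList).1 = f0
  generalize (pvSplitCF (PySem.Str.strip s).toList).2 = fs
  have e : pvEmit (([] : List String), (PySem.Set.empty : PySem.Set String)) (pvSym f0)
      = (pvH [] f0, pvH [] f0) := by
    rw [show (PySem.Set.empty : PySem.Set String) = ([] : PySem.Set String) from rfl,
      pv_emit_pair]
    rfl
  show (fs.foldl (fun a g => pvEmit a (pvSym g))
      (pvEmit ([], PySem.Set.empty) (pvSym f0))).1 = (f0 :: fs).foldl pvH []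
  rw [e, pv_emit_foldl fs (pvH [] f0), List.foldl_cons]

theorem pv_core (s : String) : parse_symbols_csv_py s = parse_symbols_csv_py_alt s := by
  rw [pv_A_eq, pv_B_eq]

-- ===== VERDICT (by name: the statement is the Claim_ definition above) =====
theorem parse_symbols_csv_py_spec : Claim_equal_parse_symbols_csv_py := by
  intro s _ _
  unfold Spec_parse_symbols_csv_py
  exact pv_core s
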